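-- pv_equiv track=rewrite | github.com/weaccelerateinc/agentshopper | account-creator/scripts/check_inbox.py | find_verification_link
-- ===== SOURCE A (Python) =====
-- def find_verification_link(links: list[str]) -> str | None:
--     """Find the most likely verification/confirmation link."""
--     keywords = ["verify", "confirm", "activate", "validate", "registration", "account"]
--     for link in links:
--         lower = link.lower()
--         if any(kw in lower for kw in keywords):
--             return link
--     # If no keyword match, return the first non-unsubscribe link
--     for link in links:
--         if "unsubscribe" not in link.lower():
--             return link
--     return links[0] if links else None
-- ===== SOURCE B (Python) =====
-- def find_verification_link(links: list[str]) -> str | None: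
--     """Find the most likely verification/confirmation link (single pass)."""
--     keywords = ["verify", "confirm", "activate", "validate", "registration", "account"]
--     first_non_unsub = None
--     for link in links:
--         lower = link.lower()
--         if any(kw in lower for kw in keywords):
--             return link
--         if first_non_unsub is None and "unsubscribe" not in lower:
--             first_non_unsub = link
--     if first_non_unsub is not None:
--         return first_non_unsub
--     return links[0] if links else None
-- ===== Notes on version B (the rewrite author's own statement) =====
-- stated objective: alternative
-- what changed: Fuses A's two sequential scans (keyword scan, then non-unsubscribe scan) into a single pass that carries a first-non-unsubscribe candidate, returning on a keyword hit and falling back to the candidate or links[0].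
import Mathlib
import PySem

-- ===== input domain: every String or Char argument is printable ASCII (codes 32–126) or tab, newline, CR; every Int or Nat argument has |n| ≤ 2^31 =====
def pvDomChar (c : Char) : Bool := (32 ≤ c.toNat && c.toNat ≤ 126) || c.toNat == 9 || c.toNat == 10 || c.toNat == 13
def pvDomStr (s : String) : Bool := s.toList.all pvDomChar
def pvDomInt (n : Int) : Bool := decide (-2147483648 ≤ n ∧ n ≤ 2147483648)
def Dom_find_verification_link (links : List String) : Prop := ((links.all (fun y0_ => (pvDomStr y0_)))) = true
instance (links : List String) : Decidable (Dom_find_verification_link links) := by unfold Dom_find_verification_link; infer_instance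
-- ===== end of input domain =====

-- B fuses A's two sequential scans into one pass carrying a first-non-unsubscribe candidate (alternative decomposition, same cost).


-- ===== PORT A =====
-- A: scan for a keyword match; else scan for a non-unsubscribe link; else links[0] or None.
def pvKeywords : List String :=
  ["verify", "confirm", "activate", "validate", "registration", "account"]

-- first loop of A: return the first link whose lowercase form contains a keyword
def pvLoopKw : List String → Option String
  | [] => none
  | link :: rest =>
    if pvKeywords.any (fun kw => PySem.Str.isIn kw (PySem.Str.lower link)) then some link
    else pvLoopKw rest

-- second loop of A: return the first link not containing "unsubscribe"
def pvLoopNonUnsub : List String → Option String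
  | [] => none
  | link :: rest =>
    if !PySem.Str.isIn "unsubscribe" (PySem.Str.lower link) then some link
    else pvLoopNonUnsub rest

def find_verification_link (links : List String) : Option String :=
  match pvLoopKw links with
  | some link => some link
  | none =>
    match pvLoopNonUnsub links with
    | some link => some link
    | none => links.head?  -- links[0] if links else None

-- ===== PORT B =====
-- B: one pass carrying the first non-unsubscribe candidate.
def pvAltGo (ls : List String) (firstNonUnsub : Option String) (links : List String) :
    Option String :=
  match ls with
  | [] =>
    match firstNonUnsub with
    | some c => some c
    | none => links.head?  -- links[0] if links else None
  | link :: rest =>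
    let lower := PySem.Str.lower link
    if pvKeywords.any (fun kw => PySem.Str.isIn kw lower) then some link
    else
      pvAltGo rest
        (if firstNonUnsub.isNone && !PySem.Str.isIn "unsubscribe" lower then some link
         else firstNonUnsub) links

def find_verification_link_alt (links : List String) : Option String :=
  pvAltGo links none links

-- ===== PRECONDITION & SPEC =====
def Spec_find_verification_link (links : List String) (out : Option String) : Prop := out = find_verification_link_alt links
instance (links : List String) (out : Option String) : Decidable (Spec_find_verification_link links out) := by unfold Spec_find_verification_link; infer_instance

-- ===== CLAIM (what is proved, stated in full; the proofs are below) =====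
def Claim_equal_find_verification_link : Prop := ∀ (links : List String), Dom_find_verification_link links → Spec_find_verification_link links (find_verification_link links)

-- ===== LEMMAS AND PROOFS =====
-- Invariant of B's single pass: it equals A's first loop on the remainder, then the
-- carried candidate, then A's second loop on the remainder, then the fallback.
theorem pvAltGo_eq (ls : List String) :
    ∀ (cand : Option String) (links : List String),
      pvAltGo ls cand links =
        match pvLoopKw ls with
        | some l => some l
        | none =>
          match cand with
          | some c => some c
          | none =>
            match pvLoopNonUnsub ls with
            | some l => some l
            | none => links.head? := by
  induction ls with
  | nil => intro cand links; cases cand <;> simp [pvAltGo, pvLoopKw, pvLoopNonUnsub]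
  | cons link rest ih =>
    intro cand links
    show (if (pvKeywords.any fun kw => PySem.Str.isIn kw (PySem.Str.lower link)) = true
          then some link
          else pvAltGo rest
            (if (cand.isNone && !PySem.Str.isIn "unsubscribe" (PySem.Str.lower link)) = true
             then some link else cand) links) = _
    by_cases hkw : (pvKeywords.any fun kw => PySem.Str.isIn kw (PySem.Str.lower link)) = true
    · rw [if_pos hkw]
      simp only [pvLoopKw]
      rw [if_pos hkw]
    · rw [if_neg hkw]
      simp only [pvLoopKw, pvLoopNonUnsub]
      rw [if_neg hkw, ih]
      cases cand with
      | some c => simp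
      | none =>
        simp only [Option.isNone_none, Bool.true_and]
        by_cases hb : (!PySem.Str.isIn "unsubscribe" (PySem.Str.lower link)) = true
        · rw [if_pos hb, if_pos hb]
        · rw [if_neg hb, if_neg hb]

-- ===== VERDICT (by name: the statement is the Claim_ definition above) =====
theorem find_verification_link_spec : Claim_equal_find_verification_link := by
  intro links _
  unfold Spec_find_verification_link find_verification_link find_verification_link_alt
  rw [pvAltGo_eq]
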